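-- pv_equiv track=rewrite | github.com/HungMinhK2/BlueOC_Entrance-test | task1/task1.py | find_frequent_string_lengths
-- ===== SOURCE A (Python) =====
-- from collections import Counter
--
-- def find_frequent_string_lengths(strings: list[str]) -> list[str]:
--     if not strings:
--         return []
--     #lấy độ dài của các chuỗi và đếm tần suất của chúng
--     length_counts = Counter(len(s) for s in strings)
--     #tìm độ dài xuất hiện nhiều nhất
--     max_freq = max(length_counts.values())
--     #lấy giá trị độ dài xuất hiện nhiều nhất
--     frequent_lengths = [length for length, freq in length_counts.items() if freq == max_freq]
--     #từ danh sách chuỗi ban đầu, lọc ra các chuỗi có độ dài nằm trong frequent_lengths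
--     result = [s for s in strings if len(s) in frequent_lengths]
--     result.sort(key=len)
--     return result
-- ===== SOURCE B (Python) =====
-- def find_frequent_string_lengths(strings: list[str]) -> list[str]:
--     if not strings:
--         return []
--     # one pass: bucket the strings by length, preserving input order
--     groups = {}
--     for s in strings:
--         groups.setdefault(len(s), []).append(s)
--     # the highest bucket size is the max frequency
--     max_freq = max(len(bucket) for bucket in groups.values())
--     # walk the lengths in ascending order and keep the maximal buckets
--     result = []
--     for length in sorted(groups):
--         bucket = groups[length]
--         if len(bucket) == max_freq:
--             result += bucket
--     return result
-- ===== Notes on version B (the rewrite author's own statement) =====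
-- stated objective: alternative
-- what changed: Instead of counting lengths, filtering the original list against the frequent-length list and stable-sorting the kept strings by length, B buckets the strings by length in one pass (preserving input order) and assembles the result by walking the distinct lengths in ascending order, concatenating every bucket of maximal size; no sort of the strings themselves is needed.
import Mathlib
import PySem

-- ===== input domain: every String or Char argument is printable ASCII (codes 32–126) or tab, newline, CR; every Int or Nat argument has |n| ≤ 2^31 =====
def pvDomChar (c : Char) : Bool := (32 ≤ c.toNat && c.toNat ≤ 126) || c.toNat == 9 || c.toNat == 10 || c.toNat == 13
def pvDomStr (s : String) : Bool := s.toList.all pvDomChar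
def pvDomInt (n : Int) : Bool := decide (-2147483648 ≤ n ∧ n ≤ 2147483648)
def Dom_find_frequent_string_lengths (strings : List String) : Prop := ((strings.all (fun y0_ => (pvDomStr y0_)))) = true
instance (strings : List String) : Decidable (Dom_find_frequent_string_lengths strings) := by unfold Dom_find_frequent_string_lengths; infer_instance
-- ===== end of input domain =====

-- B replaces A's count-then-filter-then-stable-sort with a single grouping pass by length
-- plus an ascending walk over the distinct lengths (different decomposition, same cost class).

-- ===== PORT A =====
def find_frequent_string_lengths (strings : List String) : List String :=
  if strings = [] then []
  else
    let length_counts := PySem.Dict.counter (strings.map PySem.Str.len)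
    let max_freq : Int := (PySem.List.max? length_counts.values (fun v => v)).getD 0
    let frequent_lengths := (length_counts.items.filter (fun p => p.2 == max_freq)).map (fun p => p.1)
    let result := strings.filter (fun s => frequent_lengths.contains (PySem.Str.len s))
    PySem.List.sorted result PySem.Str.len false

-- ===== PORT B =====
def find_frequent_string_lengths_alt (strings : List String) : List String :=
  if strings = [] then []
  else
    let groups := strings.foldl
      (fun d s => d.modify (PySem.Str.len s) [] (fun b => b ++ [s])) PySem.Dict.empty
    let max_freq : Int :=
      (PySem.List.max? (groups.values.map (fun b => (b.length : Int))) (fun v => v)).getD 0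
    let sortedKeys := PySem.List.sorted groups.keys (fun k => k) false
    sortedKeys.foldl (fun acc k =>
      let bucket := groups.getD k []
      if (bucket.length : Int) == max_freq then acc ++ bucket else acc) []

-- ===== PRECONDITION & SPEC =====
def Spec_find_frequent_string_lengths (strings : List String) (out : List String) : Prop := out = find_frequent_string_lengths_alt strings
instance (strings : List String) (out : List String) : Decidable (Spec_find_frequent_string_lengths strings out) := by unfold Spec_find_frequent_string_lengths; infer_instance

-- ===== CLAIM (what is proved, stated in full; the proofs are below) =====
def Claim_equal_find_frequent_string_lengths : Prop := ∀ (strings : List String), Dom_find_frequent_string_lengths strings → Spec_find_frequent_string_lengths strings (find_frequent_string_lengths strings)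

-- ===== LEMMAS AND PROOFS =====

-- insertBy passes over a prefix it does not go before
theorem pv_insertBy_append {α : Type} (before : α → α → Bool) (x : α) (L1 L2 : List α)
    (h : ∀ y ∈ L1, before x y = false) :
    PySem.List.insertBy before x (L1 ++ L2) = L1 ++ PySem.List.insertBy before x L2 := by
  induction L1 with
  | nil => simp
  | cons a t ih =>
    have ha : before x a = false := h a (by simp)
    simp [PySem.List.insertBy, ha, ih (fun y hy => h y (by simp [hy]))]

theorem pv_insertBy_all_before {α : Type} (before : α → α → Bool) (x : α) (L : List α)
    (h : ∀ y ∈ L, before x y = true) :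
    PySem.List.insertBy before x L = x :: L := by
  cases L with
  | nil => rfl
  | cons a t => simp [PySem.List.insertBy, h a (by simp)]

-- flatMap with an if-guard is flatMap over the filtered list
theorem pv_flatMap_if {α β : Type} (p : α → Bool) (g : α → List β) (l : List α) :
    l.flatMap (fun k => if p k then g k else []) = (l.filter p).flatMap g := by
  induction l with
  | nil => rfl
  | cons a t ih => by_cases h : p a <;> simp [List.flatMap_cons, h, ih]

theorem pv_flatMap_congr {α β : Type} (l : List α) (f g : α → List β)
    (h : ∀ a ∈ l, f a = g a) : l.flatMap f = l.flatMap g := by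
  induction l with
  | nil => rfl
  | cons a t ih =>
    simp [List.flatMap_cons, h a (by simp), ih (fun a ha => h a (by simp [ha]))]

-- inserting an element whose key is in the strictly increasing key list lands at the end of its bucket
theorem pv_insertBy_flatMap (ks : List Int) (hks : ks.Pairwise (· < ·))
    (g : Int → List String) (hg : ∀ k, ∀ s ∈ g k, PySem.Str.len s = k)
    (x : String) (hk : PySem.Str.len x ∈ ks) :
    PySem.List.insertBy (fun a b => decide (PySem.Str.len a < PySem.Str.len b)) x (ks.flatMap g)
      = ks.flatMap (fun k => g k ++ if PySem.Str.len x == k then [x] else []) := by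
  induction ks with
  | nil => simp at hk
  | cons k0 ks' ih =>
    rw [List.pairwise_cons] at hks
    rcases List.mem_cons.mp hk with h0 | hmem
    · -- x belongs to the first bucket
      rw [List.flatMap_cons, List.flatMap_cons,
        pv_insertBy_append _ _ _ _ (by
          intro y hy
          have hl := hg k0 y hy
          simp at hl h0 ⊢
          omega),
        pv_insertBy_all_before _ _ _ (by
          intro y hy
          rcases List.mem_flatMap.mp hy with ⟨j, hj, hyj⟩
          have hl := hg j y hyj
          have hlt := hks.1 j hj
          simp at hl h0 ⊢
          omega),
        pv_flatMap_congr ks' g (fun k => g k ++ if PySem.Str.len x == k then [x] else []) (by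
          intro j hj
          have hlt := hks.1 j hj
          have hne : ¬ ((x.length : Int) = j) := by simp at h0; omega
          simp [hne])]
      simp at h0
      simp [h0]
    · -- x belongs to a later bucket
      have hgt : k0 < PySem.Str.len x := hks.1 _ hmem
      rw [List.flatMap_cons, List.flatMap_cons,
        pv_insertBy_append _ _ _ _ (by
          intro y hy
          have hl := hg k0 y hy
          simp at hl hgt ⊢
          omega),
        ih hks.2 hmem]
      have hne : ¬ ((x.length : Int) = k0) := by simp at hgt; omega
      simp [hne]

-- The core identity: stable sort by key over strictly increasing distinct keys = bucket concatenation
theorem pv_sorted_eq_flatMap (ks : List Int) (hks : ks.Pairwise (· < ·)) (xs : List String)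
    (hx : ∀ s ∈ xs, PySem.Str.len s ∈ ks) :
    PySem.List.sorted xs PySem.Str.len false
      = ks.flatMap (fun k => xs.filter (fun s => PySem.Str.len s == k)) := by
  induction xs using List.reverseRecOn with
  | nil => simp [PySem.List.sorted]
  | append_singleton ys x ih =>
    rw [PySem.List.sorted_eq_foldl_insertBy, List.foldl_append]
    simp only [List.foldl_cons, List.foldl_nil]
    rw [← PySem.List.sorted_eq_foldl_insertBy,
      ih (fun s hs => hx s (by simp [hs])),
      pv_insertBy_flatMap ks hks _ (by
        intro k s hs
        have := List.of_mem_filter hs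
        exact eq_of_beq this) x (hx x (by simp))]
    apply pv_flatMap_congr
    intro k _
    rw [List.filter_append]
    by_cases h : ((x.length : Int) = k) <;> simp [h]

-- the grouping fold: bucket of k is the filter by length k
theorem pv_groups_getD (strings : List String) (k : Int) :
    (strings.foldl (fun d s => d.modify (PySem.Str.len s) [] (fun b => b ++ [s]))
        PySem.Dict.empty).getD k []
      = strings.filter (fun s => PySem.Str.len s == k) := by
  have h : strings.foldl (fun d s => d.modify (PySem.Str.len s) [] (fun b => b ++ [s]))
        PySem.Dict.empty
      = (strings.map (fun s => (PySem.Str.len s, s))).foldl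
          (fun d p => d.modify p.1 [] (fun b => b ++ [p.2])) PySem.Dict.empty := by
    rw [List.foldl_map]
  rw [h, PySem.Dict.getD_foldl_modify_append]
  simp [List.filter_map, List.map_map, Function.comp_def]

theorem pv_groups_keys (strings : List String) :
    (strings.foldl (fun d s => d.modify (PySem.Str.len s) [] (fun b => b ++ [s]))
        PySem.Dict.empty).keys
      = PySem.Set.ofList (strings.map PySem.Str.len) := by
  rw [PySem.Dict.keys_foldl_modify_key strings PySem.Str.len []
    (fun _ s => fun b => b ++ [s]) PySem.Dict.empty]
  rfl

theorem pv_groups_nodup (strings : List String) :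
    (strings.foldl (fun d s => d.modify (PySem.Str.len s) [] (fun b => b ++ [s]))
        PySem.Dict.empty).keys.Nodup :=
  PySem.Dict.nodup_keys_foldl_modify_key strings PySem.Str.len []
    (fun _ s => fun b => b ++ [s]) PySem.Dict.empty PySem.Dict.nodup_keys_empty

-- bucket size = multiplicity of the length
theorem pv_filter_length_eq_count (strings : List String) (k : Int) :
    ((strings.filter (fun s => PySem.Str.len s == k)).length : Int)
      = ((strings.map PySem.Str.len).count k : Int) := by
  rw [List.count_eq_countP, List.countP_map, List.countP_eq_length_filter]
  rfl

theorem pv_counter_values (ls : List Int) :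
    (PySem.Dict.counter ls).values
      = (PySem.Set.ofList ls).map (fun k => (ls.count k : Int)) := by
  simp only [PySem.Dict.values, PySem.Dict.items_counter, List.map_map]
  rfl

theorem pv_groups_values (strings : List String) :
    (strings.foldl (fun d s => d.modify (PySem.Str.len s) [] (fun b => b ++ [s]))
        PySem.Dict.empty).values.map (fun b => (b.length : Int))
      = (PySem.Set.ofList (strings.map PySem.Str.len)).map
          (fun k => (((strings.map PySem.Str.len)).count k : Int)) := by
  have hnd := pv_groups_nodup strings
  have hitems : ∀ p ∈ (strings.foldl
        (fun d s => d.modify (PySem.Str.len s) [] (fun b => b ++ [s]))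
        PySem.Dict.empty).items,
      ((p.2.length : Int))
        = (((strings.map PySem.Str.len)).count p.1 : Int) := by
    intro p hp
    have := PySem.Dict.getD_of_mem_items _ (by rw [Prod.mk.eta]; exact hp) hnd []
    rw [← this, pv_groups_getD, pv_filter_length_eq_count]
  calc (strings.foldl (fun d s => d.modify (PySem.Str.len s) [] (fun b => b ++ [s]))
        PySem.Dict.empty).values.map (fun b => (b.length : Int))
      = (strings.foldl (fun d s => d.modify (PySem.Str.len s) [] (fun b => b ++ [s]))
        PySem.Dict.empty).items.map (fun p => (p.2.length : Int)) := by
        simp only [PySem.Dict.values, List.map_map]; rfl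
    _ = (strings.foldl (fun d s => d.modify (PySem.Str.len s) [] (fun b => b ++ [s]))
        PySem.Dict.empty).items.map
          (fun p => (((strings.map PySem.Str.len)).count p.1 : Int)) :=
        List.map_congr_left hitems
    _ = (strings.foldl (fun d s => d.modify (PySem.Str.len s) [] (fun b => b ++ [s]))
        PySem.Dict.empty).keys.map
          (fun k => (((strings.map PySem.Str.len)).count k : Int)) := by
        simp only [PySem.Dict.keys, List.map_map]; rfl
    _ = _ := by rw [pv_groups_keys]

theorem pv_counter_freq (ls : List Int) (M : Int) :
    ((PySem.Dict.counter ls).items.filter (fun p => p.2 == M)).map (fun p => p.1)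
      = (PySem.Set.ofList ls).filter (fun k => ((ls.count k : Int) == M)) := by
  rw [PySem.Dict.items_counter, List.filter_map]
  simp [List.map_map, Function.comp_def]

theorem pv_fold_buckets (ks : List Int) (g : Int → List String) (p : Int → Bool) :
    ks.foldl (fun acc k => if p k then acc ++ g k else acc) []
      = (ks.filter p).flatMap g := by
  rw [PySem.List.foldl_congr_mem ks _ (fun acc k => acc ++ (if p k then g k else [])) []
      (by intro acc k _; by_cases h : p k <;> simp [h]),
    PySem.List.foldl_append_eq_flatMap, pv_flatMap_if]
  simp

theorem find_frequent_string_lengths_spec_aux (strings : List String) :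
    find_frequent_string_lengths strings = find_frequent_string_lengths_alt strings := by
  by_cases hnil : strings = []
  · simp [find_frequent_string_lengths, find_frequent_string_lengths_alt, hnil]
  · unfold find_frequent_string_lengths find_frequent_string_lengths_alt
    rw [if_neg hnil, if_neg hnil]
    simp only [pv_counter_values, pv_groups_values, pv_groups_keys, pv_counter_freq,
      pv_fold_buckets]
    set ls := strings.map PySem.Str.len with hls
    set M : Int := (PySem.List.max?
        ((PySem.Set.ofList ls).map (fun k => ((ls.count k : Int)))) (fun v => v)).getD 0 with hM
    rw [List.filter_congr (l := PySem.List.sorted (PySem.Set.ofList ls) (fun v => v))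
        (q := fun k => ((ls.count k : Int) == M))
        (by intro k _; rw [pv_groups_getD, pv_filter_length_eq_count]),
      pv_flatMap_congr _ _ (fun k => strings.filter (fun s => PySem.Str.len s == k))
        (fun k _ => pv_groups_getD strings k)]
    rw [pv_sorted_eq_flatMap
        (((PySem.List.sorted (PySem.Set.ofList ls) (fun v => v)).filter
          (fun k => ((ls.count k : Int) == M))))
        ((PySem.List.sorted_ofList_pairwise_lt ls).filter _)
        _
        (by
          intro s hs
          have hf := List.of_mem_filter hs
          simp only [List.contains_iff_mem] at hf
          rcases List.mem_filter.mp hf with ⟨hmem, hq⟩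
          exact List.mem_filter.mpr ⟨(PySem.List.mem_sorted _ _ _ _).mpr hmem, hq⟩)]
    apply pv_flatMap_congr
    intro k hk
    rw [List.filter_filter]
    apply List.filter_congr
    intro s _
    by_cases hsk : PySem.Str.len s = k
    · have hkF : k ∈ (PySem.Set.ofList ls).filter (fun k => ((ls.count k : Int) == M)) := by
        rcases List.mem_filter.mp hk with ⟨hks, hq⟩
        exact List.mem_filter.mpr ⟨(PySem.List.mem_sorted _ _ _ _).mp hks, hq⟩
      simp at hkF
      simp
      intro h
      rw [h]
      exact hkF
    · simp at hsk
      simp [hsk]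

-- ===== VERDICT (by name: the statement is the Claim_ definition above) =====
theorem find_frequent_string_lengths_spec : Claim_equal_find_frequent_string_lengths := by
  intro strings _
  exact find_frequent_string_lengths_spec_aux strings
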